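-- pv_equiv track=rewrite | github.com/VRAXION/VRAXION | tools/diag_highway_pocket_mutation.py | highway_symbolic
-- ===== SOURCE A (Python) =====
-- SYMBOLS = ("A", "B", "C")
--
-- def label_count(n: int) -> str:
--     return f"COUNT{max(0, min(4, n))}"
--
-- def highway_symbolic(tokens: tuple[str, ...]) -> str:
--     active = "NONE"
--     count = 0
--     saw_entity = False
--     for tok in tokens:
--         if tok == "reset":
--             active = "NONE"
--         elif tok in SYMBOLS:
--             active = tok
--         elif tok.startswith("anti_"):
--             active = tok.split("_", 1)[1]
--         elif tok.startswith("mention_"):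
--             active = tok.split("_", 1)[1]
--         elif tok.startswith("quote_anti_"):
--             active = tok.split("_", 2)[2]
--         elif tok.startswith("actually_") or tok.startswith("instead_"):
--             active = tok.split("_", 1)[1]
--         elif tok == "create_X":
--             count += 1
--             saw_entity = True
--         elif tok == "remove_X":
--             count = max(0, count - 1)
--             saw_entity = True
--         elif tok == "restore_X":
--             count = min(4, count + 1)
--             saw_entity = True
--     if saw_entity and tokens and tokens[-1] == "query_count":
--         return label_count(count)
--     return active
-- ===== SOURCE B (Python) =====
-- SYMBOLS = ("A", "B", "C")
--
-- def label_count(n: int) -> str: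
--     return f"COUNT{max(0, min(4, n))}"
--
-- _ENTITY = ("create_X", "remove_X", "restore_X")
--
-- def _active_value(tok):
--     """Value this token sets the active symbol to, or None if it doesn't touch it."""
--     if tok == "reset":
--         return "NONE"
--     if tok in SYMBOLS:
--         return tok
--     if tok.startswith("anti_") or tok.startswith("mention_"):
--         return tok.split("_", 1)[1]
--     if tok.startswith("quote_anti_"):
--         return tok.split("_", 2)[2]
--     if tok.startswith("actually_") or tok.startswith("instead_"):
--         return tok.split("_", 1)[1]
--     return None
--
-- def highway_symbolic(tokens):
--     if tokens and tokens[-1] == "query_count" and any(t in _ENTITY for t in tokens):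
--         count = 0
--         for t in tokens:
--             if t == "create_X":
--                 count += 1
--             elif t == "remove_X":
--                 count = max(0, count - 1)
--             elif t == "restore_X":
--                 count = min(4, count + 1)
--         return label_count(count)
--     for tok in reversed(tokens):
--         v = _active_value(tok)
--         if v is not None:
--             return v
--     return "NONE"
-- ===== Notes on version B (the rewrite author's own statement) =====
-- stated objective: alternative
-- what changed: A's single forward pass over one interleaved (active, count, saw_entity) state machine is replaced by two independent passes: a reverse scan returning the value set by the last active-setting token, and a separate fold of only the entity tokens for the count, chosen by first testing whether the query-count case applies.
import Mathlib
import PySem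

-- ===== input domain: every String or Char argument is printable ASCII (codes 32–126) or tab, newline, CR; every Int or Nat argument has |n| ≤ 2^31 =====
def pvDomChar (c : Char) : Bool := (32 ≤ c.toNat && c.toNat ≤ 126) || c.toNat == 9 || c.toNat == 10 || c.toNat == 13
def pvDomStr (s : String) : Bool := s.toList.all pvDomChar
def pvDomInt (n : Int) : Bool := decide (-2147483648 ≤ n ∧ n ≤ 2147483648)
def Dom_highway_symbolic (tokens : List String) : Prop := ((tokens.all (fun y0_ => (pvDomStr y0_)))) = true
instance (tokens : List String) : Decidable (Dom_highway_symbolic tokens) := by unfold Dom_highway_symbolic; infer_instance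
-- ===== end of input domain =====

-- B replaces A's single interleaved state-machine pass by two independent, differently-shaped
-- passes: a reverse scan for the active symbol and a separate fold over entity tokens for the
-- count (objective: alternative decomposition; same asymptotic cost).

-- shared port of `tok.split("_", m)[i]` (both Pythons call split the same way; the index
-- is always in range where the ports use it, so the `""` default is never taken)
def pvSplitField (tok : String) (m : Int) (i : Int) : String :=
  ((PySem.Str.splitMax? tok "_" m).bind (fun ps => PySem.List.pyGet? ps i)).getD ""

-- shared port of label_count (identical helper in both Pythons)
def pvLabelCount (n : Int) : String := "COUNT" ++ PySem.Int.toStr (max 0 (min 4 n))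

-- ===== PORT A =====
-- state = (active, count, saw_entity); the loop body, branch for branch
def pvStepA (st : String × Int × Bool) (tok : String) : String × Int × Bool :=
  let (active, count, saw) := st
  if tok == "reset" then ("NONE", count, saw)
  else if tok == "A" || tok == "B" || tok == "C" then (tok, count, saw)
  else if PySem.Str.startswith tok "anti_" then (pvSplitField tok 1 1, count, saw)
  else if PySem.Str.startswith tok "mention_" then (pvSplitField tok 1 1, count, saw)
  else if PySem.Str.startswith tok "quote_anti_" then (pvSplitField tok 2 2, count, saw)
  else if PySem.Str.startswith tok "actually_" || PySem.Str.startswith tok "instead_" then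
    (pvSplitField tok 1 1, count, saw)
  else if tok == "create_X" then (active, count + 1, true)
  else if tok == "remove_X" then (active, max 0 (count - 1), true)
  else if tok == "restore_X" then (active, min 4 (count + 1), true)
  else (active, count, saw)

def highway_symbolic (tokens : List String) : String :=
  let st := tokens.foldl pvStepA ("NONE", 0, false)
  if st.2.2 && !tokens.isEmpty && (PySem.List.pyGet? tokens (-1) == some "query_count") then
    pvLabelCount st.2.1
  else st.1

-- ===== PORT B =====
def pvActiveValue (tok : String) : Option String :=
  if tok == "reset" then some "NONE"
  else if tok == "A" || tok == "B" || tok == "C" then some tok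
  else if PySem.Str.startswith tok "anti_" || PySem.Str.startswith tok "mention_" then
    some (pvSplitField tok 1 1)
  else if PySem.Str.startswith tok "quote_anti_" then some (pvSplitField tok 2 2)
  else if PySem.Str.startswith tok "actually_" || PySem.Str.startswith tok "instead_" then
    some (pvSplitField tok 1 1)
  else none

def pvIsEntity (tok : String) : Bool :=
  tok == "create_X" || tok == "remove_X" || tok == "restore_X"

def pvCountStep (c : Int) (tok : String) : Int :=
  if tok == "create_X" then c + 1
  else if tok == "remove_X" then max 0 (c - 1)
  else if tok == "restore_X" then min 4 (c + 1)
  else c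

-- the `for tok in reversed(tokens): … return v` loop
def pvFirstActive : List String → String
  | [] => "NONE"
  | t :: rest => match pvActiveValue t with
    | some v => v
    | none => pvFirstActive rest

def highway_symbolic_alt (tokens : List String) : String :=
  if !tokens.isEmpty && (PySem.List.pyGet? tokens (-1) == some "query_count")
      && tokens.any pvIsEntity then
    pvLabelCount (tokens.foldl pvCountStep 0)
  else
    pvFirstActive tokens.reverse

-- ===== PRECONDITION & SPEC =====
def Spec_highway_symbolic (tokens : List String) (out : String) : Prop := out = highway_symbolic_alt tokens
instance (tokens : List String) (out : String) : Decidable (Spec_highway_symbolic tokens out) := by unfold Spec_highway_symbolic; infer_instance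

-- ===== CLAIM (what is proved, stated in full; the proofs are below) =====
def Claim_equal_highway_symbolic : Prop := ∀ (tokens : List String), Dom_highway_symbolic tokens → Spec_highway_symbolic tokens (highway_symbolic tokens)

-- ===== LEMMAS AND PROOFS =====

-- A's loop body in terms of B's three token classifiers (the three token classes are disjoint)
theorem pvStepA_eq (a : String) (c : Int) (s : Bool) (t : String) :
    pvStepA (a, c, s) t = ((pvActiveValue t).getD a, pvCountStep c t, s || pvIsEntity t) := by
  simp only [pvStepA, pvActiveValue, pvCountStep, pvIsEntity]
  split_ifs <;> try simp_all
  all_goals (exfalso; simp_all [PySem.Chars.startswith])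

theorem pvFirstActive_eq (l : List String) :
    pvFirstActive l = (l.findSome? pvActiveValue).getD "NONE" := by
  induction l with
  | nil => rfl
  | cons t rest ih =>
    simp only [pvFirstActive, List.findSome?]
    cases pvActiveValue t <;> simp [ih]

theorem foldA_eq (ts : List String) : ∀ (a : String) (c : Int) (s : Bool),
    ts.foldl pvStepA (a, c, s) =
      ((ts.reverse.findSome? pvActiveValue).getD a, ts.foldl pvCountStep c, s || ts.any pvIsEntity) := by
  induction ts with
  | nil => intro a c s; simp
  | cons t rest ih =>
    intro a c s
    simp only [List.foldl_cons, pvStepA_eq, ih, List.reverse_cons, List.findSome?_append,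
      List.any_cons]
    cases h : rest.reverse.findSome? pvActiveValue <;>
      simp [List.findSome?, Bool.or_assoc] <;> cases pvActiveValue t <;> simp

-- ===== VERDICT (by name: the statement is the Claim_ definition above) =====
theorem highway_symbolic_spec : Claim_equal_highway_symbolic := by
  intro tokens _
  unfold Spec_highway_symbolic highway_symbolic highway_symbolic_alt
  simp only [foldA_eq, Bool.false_or]
  rw [pvFirstActive_eq]
  cases h1 : tokens.any pvIsEntity <;>
  cases h2 : tokens.isEmpty <;>
  cases h3 : (PySem.List.pyGet? tokens (-1) == some "query_count") <;> simp
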